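-- pv_equiv track=rewrite | github.com/ExposuresProvider/icees-api | qctool/src/qc.py | difference_ignore_suffix
-- ===== SOURCE A (Python) =====
-- def difference_ignore_suffix(a, b, ignore_suffix):
--     diff = []
--     for an in a:
--         found = False
--         for bn in b:
--             if an == bn or any([an == bn + suffix or an + suffix == bn for suffix in ignore_suffix]):
--                 found = True
--                 break
--         if not found:
--             diff.append(an)
--     return diff
-- ===== SOURCE B (Python) =====
-- def difference_ignore_suffix(a, b, ignore_suffix):
--     # Build the full index of acceptable names once: every bn, every bn+suffix,
--     # and every bn with a suffix stripped off (so an+suffix == bn is one lookup too).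
--     acceptable = set()
--     for bn in b:
--         acceptable.add(bn)
--         for suffix in ignore_suffix:
--             acceptable.add(bn + suffix)
--             if suffix and bn.endswith(suffix):
--                 acceptable.add(bn[:-len(suffix)])
--     return [an for an in a if an not in acceptable]
-- ===== Notes on version B (the rewrite author's own statement) =====
-- stated objective: faster
-- what changed: One preprocessing pass over b builds a closed 'acceptable' index (each bn, each bn+suffix, and bn with each matching nonempty suffix stripped), after which each element of a is decided by a single hash-set lookup with no loop over b or over the suffixes.
import Mathlib
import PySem

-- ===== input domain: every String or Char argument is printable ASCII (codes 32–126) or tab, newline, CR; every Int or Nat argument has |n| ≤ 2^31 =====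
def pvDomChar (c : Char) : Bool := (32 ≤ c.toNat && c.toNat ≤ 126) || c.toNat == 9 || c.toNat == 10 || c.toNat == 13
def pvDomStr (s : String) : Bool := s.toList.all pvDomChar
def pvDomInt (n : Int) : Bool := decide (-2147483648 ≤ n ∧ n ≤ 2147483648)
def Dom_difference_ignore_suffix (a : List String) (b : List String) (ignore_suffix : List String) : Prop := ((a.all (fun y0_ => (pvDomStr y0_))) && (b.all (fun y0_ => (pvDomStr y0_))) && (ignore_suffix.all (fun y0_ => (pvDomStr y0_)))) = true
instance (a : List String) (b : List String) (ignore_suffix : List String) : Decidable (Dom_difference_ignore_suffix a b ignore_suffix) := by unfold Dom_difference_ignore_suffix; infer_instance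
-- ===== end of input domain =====

-- B builds one closed 'acceptable' index over b (bn, bn+suffix, bn stripped of a matching
-- nonempty suffix) in a preprocessing pass, then decides each element of a with a single
-- set lookup; measurably faster (asymptotic mechanism confirmed).


-- ===== PORT A =====
-- inner 'for bn in b: … break' loop of A, searching for a match for an
def disFound (an : String) (ignore_suffix : List String) : List String → Bool
  | [] => false
  | bn :: rest =>
    if an == bn || ((ignore_suffix.map (fun suffix => an == bn ++ suffix || an ++ suffix == bn)).any id)
    then true
    else disFound an ignore_suffix rest

def difference_ignore_suffix (a : List String) (b : List String) (ignore_suffix : List String) : List String :=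
  a.foldl (fun diff an => if disFound an ignore_suffix b then diff else diff ++ [an]) []

-- ===== PORT B =====
-- body of B's inner 'for suffix in ignore_suffix' preprocessing loop
def disAccStep (bn : String) (acc2 : PySem.Set String) (suffix : String) : PySem.Set String :=
  let acc3 := PySem.Set.add acc2 (bn ++ suffix)
  if suffix != "" && PySem.Str.endswith bn suffix then
    PySem.Set.add acc3 (PySem.Str.slice bn none (some (-(PySem.Str.len suffix : Int))))
  else acc3

def difference_ignore_suffix_alt (a : List String) (b : List String) (ignore_suffix : List String) : List String :=
  let acceptable : PySem.Set String :=
    b.foldl (fun acc bn => ignore_suffix.foldl (disAccStep bn) (PySem.Set.add acc bn))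
      PySem.Set.empty
  a.filter (fun an => !(PySem.Set.contains acceptable an))

-- ===== PRECONDITION & SPEC =====
def Spec_difference_ignore_suffix (a : List String) (b : List String) (ignore_suffix : List String) (out : List String) : Prop := out = difference_ignore_suffix_alt a b ignore_suffix
instance (a : List String) (b : List String) (ignore_suffix : List String) (out : List String) : Decidable (Spec_difference_ignore_suffix a b ignore_suffix out) := by unfold Spec_difference_ignore_suffix; infer_instance

-- ===== CLAIM (what is proved, stated in full; the proofs are below) =====
def Claim_equal_difference_ignore_suffix : Prop := ∀ (a : List String) (b : List String) (ignore_suffix : List String), Dom_difference_ignore_suffix a b ignore_suffix → Spec_difference_ignore_suffix a b ignore_suffix (difference_ignore_suffix a b ignore_suffix)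

-- ===== LEMMAS AND PROOFS =====

theorem disFound_iff (an : String) (ig b : List String) :
    disFound an ig b = true ↔ ∃ bn ∈ b, an = bn ∨ ∃ s ∈ ig, an = bn ++ s ∨ an ++ s = bn := by
  induction b with
  | nil => simp [disFound]
  | cons bn rest ih =>
    simp only [disFound, Bool.if_true_left, Bool.or_eq_true, ih, List.any_map, List.any_eq_true,
      beq_iff_eq, Function.comp, id_eq, List.mem_cons, decide_eq_true_eq, Bool.decide_or, Bool.or_eq_true]
    constructor
    · rintro ((rfl | ⟨s, hs, h⟩) | ⟨x, hx, hm⟩)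
      · exact ⟨an, Or.inl rfl, Or.inl rfl⟩
      · exact ⟨bn, Or.inl rfl, Or.inr ⟨s, hs, h⟩⟩
      · exact ⟨x, Or.inr hx, hm⟩
    · rintro ⟨x, (rfl | hx), hm⟩
      · rcases hm with rfl | ⟨s, hs, h⟩
        · exact Or.inl (Or.inl rfl)
        · exact Or.inl (Or.inr ⟨s, hs, h⟩)
      · exact Or.inr ⟨x, hx, hm⟩

-- appending a list then taking it back off: the characterisation behind the suffix strip
theorem append_eq_iff_suffix_take {l m n : List Char} :
    l ++ m = n ↔ (m <:+ n ∧ l = n.take (n.length - m.length)) := by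
  constructor
  · rintro rfl
    refine ⟨⟨l, rfl⟩, ?_⟩
    simp
  · rintro ⟨⟨t, rfl⟩, hl⟩
    simp at hl
    simp [hl]

-- the stripped string as a list
theorem strip_toList (bn s : String) (hs : s.toList ≠ []) :
    (PySem.Str.slice bn none (some (-(PySem.Str.len s : Int)))).toList
      = bn.toList.take (bn.toList.length - s.toList.length) := by
  have h1 : (PySem.Str.slice bn none (some (-(PySem.Str.len s : Int)))).toList
      = PySem.List.slice bn.toList none (some (-(s.toList.length : Int))) := by
    simp [PySem.Str.len_eq]
  rw [h1, PySem.List.slice_to_neg_natCast]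
  exact Nat.pos_of_ne_zero (fun h => hs (List.length_eq_zero_iff.mp h))

-- for a nonempty suffix, membership of the stripped-form branch is exactly 'an ++ s = bn'
theorem strip_iff (an bn s : String) (hs : s ≠ "") :
    (PySem.Str.endswith bn s = true ∧ an = PySem.Str.slice bn none (some (-(PySem.Str.len s : Int))))
      ↔ an ++ s = bn := by
  have hs' : s.toList ≠ [] := fun h => hs (String.toList_inj.mp (by simpa using h))
  have hsw : PySem.Str.endswith bn s = true ↔ s.toList <:+ bn.toList := by
    rw [PySem.Str.endswith_eq]; exact PySem.Chars.endswith_iff _ _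
  have hEq : ∀ (x y : String), x = y ↔ x.toList = y.toList :=
    fun x y => ⟨fun h => h ▸ rfl, String.toList_inj.mp⟩
  rw [hsw, hEq an, strip_toList bn s hs', hEq (an ++ s) bn]
  simp only [String.toList_append]
  exact append_eq_iff_suffix_take.symm

theorem mem_disAccStep_foldl (an bn : String) (ig : List String) (acc : PySem.Set String) :
    an ∈ ig.foldl (disAccStep bn) acc ↔
      an ∈ acc ∨ ∃ s ∈ ig, an = bn ++ s ∨
        (s ≠ "" ∧ PySem.Str.endswith bn s = true ∧
          an = PySem.Str.slice bn none (some (-(PySem.Str.len s : Int)))) := by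
  induction ig generalizing acc with
  | nil => simp
  | cons s rest ih =>
    simp only [List.foldl_cons, ih, List.mem_cons]
    have hstep : an ∈ disAccStep bn acc s ↔
        an ∈ acc ∨ an = bn ++ s ∨
          (s ≠ "" ∧ PySem.Str.endswith bn s = true ∧
            an = PySem.Str.slice bn none (some (-(PySem.Str.len s : Int)))) := by
      unfold disAccStep
      by_cases h1 : s = ""
      · subst h1; simp [PySem.Set.mem_add]
      · by_cases h2 : PySem.Str.endswith bn s = true
        · have h2' : PySem.Chars.endswith bn.toList s.toList = true := by simpa using h2
          simp [h1, h2', PySem.Set.mem_add, or_assoc]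
        · have h2' : ¬ PySem.Chars.endswith bn.toList s.toList = true := by simpa using h2
          simp [h1, h2', PySem.Set.mem_add]
    rw [hstep]
    constructor
    · rintro ((h | h) | ⟨t, ht, hm⟩)
      · exact Or.inl h
      · exact Or.inr ⟨s, Or.inl rfl, h⟩
      · exact Or.inr ⟨t, Or.inr ht, hm⟩
    · rintro (h | ⟨t, (rfl | ht), hm⟩)
      · exact Or.inl (Or.inl h)
      · exact Or.inl (Or.inr hm)
      · exact Or.inr ⟨t, ht, hm⟩

theorem mem_acceptable (an : String) (b ig : List String) (acc : PySem.Set String) :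
    an ∈ b.foldl (fun acc bn => ig.foldl (disAccStep bn) (PySem.Set.add acc bn)) acc ↔
      an ∈ acc ∨ ∃ bn ∈ b, an = bn ∨ ∃ s ∈ ig, an = bn ++ s ∨
        (s ≠ "" ∧ PySem.Str.endswith bn s = true ∧
          an = PySem.Str.slice bn none (some (-(PySem.Str.len s : Int)))) := by
  induction b generalizing acc with
  | nil => simp
  | cons bn rest ih =>
    simp only [List.foldl_cons, ih, mem_disAccStep_foldl, PySem.Set.mem_add, List.mem_cons]
    constructor
    · rintro (((h | rfl) | ⟨s, hs, hm⟩) | ⟨x, hx, hm⟩)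
      · exact Or.inl h
      · exact Or.inr ⟨an, Or.inl rfl, Or.inl rfl⟩
      · exact Or.inr ⟨bn, Or.inl rfl, Or.inr ⟨s, hs, hm⟩⟩
      · exact Or.inr ⟨x, Or.inr hx, hm⟩
    · rintro (h | ⟨x, (rfl | hx), hm⟩)
      · exact Or.inl (Or.inl (Or.inl h))
      · rcases hm with rfl | ⟨s, hs, hm⟩
        · exact Or.inl (Or.inl (Or.inr rfl))
        · exact Or.inl (Or.inr ⟨s, hs, hm⟩)
      · exact Or.inr ⟨x, hx, hm⟩

-- B's single lookup decides exactly A's match predicate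
theorem pred_eq (an : String) (b ig : List String) :
    (!(PySem.Set.contains
        (b.foldl (fun acc bn => ig.foldl (disAccStep bn) (PySem.Set.add acc bn)) PySem.Set.empty)
        an))
    = !disFound an ig b := by
  rw [Bool.not_inj_iff, show ∀ x y : Bool, x = y ↔ (x = true ↔ y = true) by
    intro x y; cases x <;> cases y <;> simp]
  rw [PySem.Set.contains_iff, mem_acceptable, disFound_iff]
  constructor
  · rintro (h | ⟨bn, hbn, hm⟩)
    · simp [PySem.Set.empty] at h
    · refine ⟨bn, hbn, ?_⟩
      rcases hm with rfl | ⟨s, hs, (rfl | ⟨hne, hend, heq⟩)⟩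
      · exact Or.inl rfl
      · exact Or.inr ⟨s, hs, Or.inl rfl⟩
      · exact Or.inr ⟨s, hs, Or.inr ((strip_iff an bn s hne).mp ⟨hend, heq⟩)⟩
  · rintro ⟨bn, hbn, (rfl | ⟨s, hs, (rfl | heq)⟩)⟩
    · exact Or.inr ⟨an, hbn, Or.inl rfl⟩
    · exact Or.inr ⟨bn, hbn, Or.inr ⟨s, hs, Or.inl rfl⟩⟩
    · by_cases hse : s = ""
      · subst hse
        have : an = bn := by simpa using heq
        exact Or.inr ⟨bn, hbn, Or.inl this⟩
      · obtain ⟨hend, hval⟩ := (strip_iff an bn s hse).mpr heq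
        exact Or.inr ⟨bn, hbn, Or.inr ⟨s, hs, Or.inr ⟨hse, hend, hval⟩⟩⟩

-- ===== VERDICT (by name: the statement is the Claim_ definition above) =====
theorem difference_ignore_suffix_spec : Claim_equal_difference_ignore_suffix := by
  intro a b ig _
  show difference_ignore_suffix a b ig = difference_ignore_suffix_alt a b ig
  unfold difference_ignore_suffix difference_ignore_suffix_alt
  have step : ∀ (diff : List String) (an : String),
      (if disFound an ig b then diff else diff ++ [an])
        = if !disFound an ig b then diff ++ [an] else diff := by
    intro diff an; cases disFound an ig b <;> simp
  simp only [step, PySem.List.foldl_append_if_eq_filter, List.nil_append]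
  exact List.filter_congr (fun an _ => (pred_eq an b ig).symm)
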